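-- pv_equiv track=rewrite | github.com/Fahimehgit/ploidy-classifier | src/run_cnn_top10_inference.py | dna_tokenizer
-- ===== SOURCE A (Python) =====
-- from typing import Dict, List, Tuple, Optional
--
-- def dna_tokenizer(seq: str, max_length: int = 154) -> List[int]:
--     token_mapping = {"A": 1, "C": 2, "G": 3, "T": 4, "-": 0}
--     tokens = [token_mapping.get(nuc.upper(), 0) for nuc in seq]
--     if len(tokens) > max_length:
--         tokens = tokens[:max_length]
--     elif len(tokens) < max_length:
--         tokens += [0] * (max_length - len(tokens))
--     return tokens
-- ===== SOURCE B (Python) =====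
-- def dna_tokenizer(seq: str, max_length: int = 154):
--     token_mapping = {"A": 1, "C": 2, "G": 3, "T": 4, "-": 0}
--     n = len(seq)
--     return [token_mapping.get(seq[i].upper(), 0) if i < n else 0
--             for i in range(max_length)]
-- ===== Notes on version B (the rewrite author's own statement) =====
-- stated objective: simpler
-- what changed: B builds the fixed-length output in one position-indexed pass over range(max_length), mapping in-range characters and emitting 0 past the end, instead of A's map-whole-sequence then truncate-or-pad branches.
-- outside the precondition, e.g. on dna_tokenizer('ACG', -1): A returns [1, 2], B returns []
import Mathlib
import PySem

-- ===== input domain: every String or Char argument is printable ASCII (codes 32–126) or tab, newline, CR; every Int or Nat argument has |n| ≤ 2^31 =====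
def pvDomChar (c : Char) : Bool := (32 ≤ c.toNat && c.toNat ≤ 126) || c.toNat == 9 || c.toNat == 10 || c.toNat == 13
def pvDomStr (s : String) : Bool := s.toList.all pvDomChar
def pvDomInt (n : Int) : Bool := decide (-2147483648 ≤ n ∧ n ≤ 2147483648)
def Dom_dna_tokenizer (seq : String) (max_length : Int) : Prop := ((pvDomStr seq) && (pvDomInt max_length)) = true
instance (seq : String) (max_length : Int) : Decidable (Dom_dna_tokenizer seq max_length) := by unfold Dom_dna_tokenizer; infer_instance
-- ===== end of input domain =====

-- B replaces A's map-then-truncate-or-pad shape by a single position-indexed pass over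
-- range(max_length) (objective: simpler). Same token mapping, identical results for max_length ≥ 0.

-- ===== PORT A =====
-- token_mapping = {"A": 1, "C": 2, "G": 3, "T": 4, "-": 0} (1-char strings modelled as Char)
def pvTokenMap : PySem.Dict Char Int :=
  ((((PySem.Dict.empty.insert 'A' 1).insert 'C' 2).insert 'G' 3).insert 'T' 4).insert '-' 0

def dna_tokenizer (seq : String) (max_length : Int) : List Int :=
  let tokens := seq.toList.map (fun nuc => pvTokenMap.getD (PySem.Chars.upperChar nuc) 0)
  if (tokens.length : Int) > max_length then PySem.List.slice tokens none (some max_length)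
  else if (tokens.length : Int) < max_length then
    tokens ++ List.replicate (max_length - (tokens.length : Int)).toNat 0
  else tokens

-- ===== PORT B =====
def dna_tokenizer_alt (seq : String) (max_length : Int) : List Int :=
  let cs := seq.toList
  let n := cs.length
  (PySem.List.pyRange 0 max_length 1).map (fun i =>
    if i < (n : Int) then pvTokenMap.getD (PySem.Chars.upperChar (PySem.List.pyGetD cs i ' ')) 0
    else 0)

-- ===== PRECONDITION & SPEC =====
-- Pre_ restricts to the natural domain of a pad/truncate length: max_length ≥ 0. For negative
-- max_length A's tokens[:max_length] drops elements from the END (a negative-slice artefact),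
-- while B naturally returns [].
def Pre_dna_tokenizer (seq : String) (max_length : Int) : Prop := 0 ≤ max_length
instance (seq : String) (max_length : Int) : Decidable (Pre_dna_tokenizer seq max_length) := by
  unfold Pre_dna_tokenizer; infer_instance
def pvWitness_dna_tokenizer : String × Int := ("ACG-t x", 5)

def Spec_dna_tokenizer (seq : String) (max_length : Int) (out : List Int) : Prop := out = dna_tokenizer_alt seq max_length
instance (seq : String) (max_length : Int) (out : List Int) : Decidable (Spec_dna_tokenizer seq max_length out) := by unfold Spec_dna_tokenizer; infer_instance

-- ===== CLAIM (what is proved, stated in full; the proofs are below) =====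
def Claim_equal_dna_tokenizer : Prop := ∀ (seq : String) (max_length : Int), Dom_dna_tokenizer seq max_length → Pre_dna_tokenizer seq max_length → Spec_dna_tokenizer seq max_length (dna_tokenizer seq max_length)

-- ===== LEMMAS AND PROOFS =====

-- the per-character token function shared by both ports' Python sources
def pvTok (c : Char) : Int := pvTokenMap.getD (PySem.Chars.upperChar c) 0

-- canonical form: position-indexed description of the fixed-length output
def pvCanon (cs : List Char) (m : Nat) : List Int :=
  (List.range m).map (fun j => if h : j < cs.length then pvTok cs[j] else 0)

lemma pvCanon_length (cs : List Char) (m : Nat) : (pvCanon cs m).length = m := by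
  simp [pvCanon]

lemma pvA_eq_canon (cs : List Char) (m : Nat) :
    (cs.map pvTok).take m ++ List.replicate (m - cs.length) 0 = pvCanon cs m := by
  apply List.ext_getElem
  · simp [pvCanon]; omega
  · intro j h1 h2
    rw [pvCanon_length] at h2
    simp only [pvCanon, List.getElem_map, List.getElem_range]
    by_cases hj : j < cs.length
    · rw [List.getElem_append_left (by simp; omega)]
      simp [hj]
    · rw [List.getElem_append_right (by simp; omega)]
      simp [hj]

lemma pvB_eq_canon (seq : String) (M : Int) :
    dna_tokenizer_alt seq M = pvCanon seq.toList M.toNat := by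
  unfold dna_tokenizer_alt pvCanon
  rw [PySem.List.pyRange_one]
  simp only [Int.sub_zero, List.map_map]
  apply List.map_congr_left
  intro j hj
  simp only [Function.comp, zero_add]
  by_cases hjn : j < seq.toList.length
  · rw [if_pos (by exact_mod_cast hjn)]
    rw [dif_pos hjn]
    rw [PySem.List.pyGetD_natCast, List.getD_eq_getElem _ _ hjn]
    rfl
  · rw [if_neg (by exact_mod_cast hjn)]
    rw [dif_neg hjn]

lemma pvA_eq_canon' (seq : String) (M : Int) (hM : 0 ≤ M) :
    dna_tokenizer seq M = pvCanon seq.toList M.toNat := by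
  unfold dna_tokenizer
  have hfun : (fun nuc => pvTokenMap.getD (PySem.Chars.upperChar nuc) 0) = pvTok := rfl
  rw [hfun, ← pvA_eq_canon seq.toList M.toNat]
  have hlen : (seq.toList.map pvTok).length = seq.toList.length := List.length_map ..
  simp only []
  split_ifs with h1 h2
  · -- truncate branch
    rw [PySem.List.slice_to _ hM]
    rw [hlen] at h1
    have hz : M.toNat - seq.toList.length = 0 := by omega
    rw [hz]
    simp
  · -- pad branch
    rw [List.take_of_length_le (by rw [hlen] at h2 ⊢; omega)]
    congr 2
    rw [hlen]
    omega
  · -- equal branch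
    rw [hlen] at h1 h2
    have hz : M.toNat - seq.toList.length = 0 := by omega
    rw [List.take_of_length_le (by rw [hlen]; omega), hz]
    simp

-- ===== VERDICT (by name: the statement is the Claim_ definition above) =====
theorem dna_tokenizer_spec : Claim_equal_dna_tokenizer := by
  intro seq M _ hPre
  unfold Spec_dna_tokenizer
  rw [pvA_eq_canon' seq M hPre, pvB_eq_canon seq M]
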